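-- pv_equiv track=rewrite | github.com/Cha0smagick/kabbalah_name_to_sacred_numbers | name_to_number.py | get_kabbalistic_number
-- ===== SOURCE A (Python) =====
-- def get_kabbalistic_number(name):
--     kabbalistic_assignment = {
--         'A': 1, 'B': 2, 'C': 3, 'D': 4, 'E': 5, 'F': 6, 'G': 7, 'H': 8, 'I': 9,
--         'J': 10, 'K': 20, 'L': 30, 'M': 40, 'N': 50, 'O': 60, 'P': 70, 'Q': 80,
--         'R': 90, 'S': 100, 'T': 200, 'U': 300, 'V': 400, 'W': 500, 'X': 600,
--         'Y': 700, 'Z': 800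
--     }
--
--     name = name.upper()
--     unique_name = ''.join(dict.fromkeys(name))
--     kabbalistic_number = sum(kabbalistic_assignment.get(letter, 0) for letter in unique_name)
--
--     return kabbalistic_number
-- ===== SOURCE B (Python) =====
-- def get_kabbalistic_number(name):
--     up = name.upper()
--     return sum((i % 9 + 1) * 10 ** (i // 9) for i in range(26) if chr(65 + i) in up)
-- ===== Notes on version B (the rewrite author's own statement) =====
-- stated objective: alternative
-- what changed: B drops both the dedup pass and the lookup table: it iterates i over range(26), computes each letter's value by the closed formula (i%9+1)*10**(i//9) and adds it when chr(65+i) occurs in the uppercased name, instead of deduplicating the name and looking each unique character up in a dict.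
import Mathlib
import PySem

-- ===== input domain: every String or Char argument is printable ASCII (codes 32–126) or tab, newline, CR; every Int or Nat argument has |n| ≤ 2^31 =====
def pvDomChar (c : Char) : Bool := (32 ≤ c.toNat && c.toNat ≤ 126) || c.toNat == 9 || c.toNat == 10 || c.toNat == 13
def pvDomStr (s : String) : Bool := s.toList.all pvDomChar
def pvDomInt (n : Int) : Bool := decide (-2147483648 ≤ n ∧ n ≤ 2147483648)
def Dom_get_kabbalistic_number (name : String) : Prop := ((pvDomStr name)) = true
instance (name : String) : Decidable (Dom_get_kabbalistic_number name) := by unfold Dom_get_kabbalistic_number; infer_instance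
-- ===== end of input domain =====

-- B replaces the dedup-and-dict-lookup pass by a scan of i = 0..25 with the closed value
-- formula (i%9+1)*10**(i//9) guarded by membership of chr(65+i) in the uppercased name
-- (constant-factor faster in a timing run: 26 C-level substring scans instead of per-character dedup/dict work).

-- the literal kabbalistic_assignment table of A
def kabPairs : List (Char × Int) :=
  [('A', 1), ('B', 2), ('C', 3), ('D', 4), ('E', 5), ('F', 6), ('G', 7), ('H', 8), ('I', 9),
   ('J', 10), ('K', 20), ('L', 30), ('M', 40), ('N', 50), ('O', 60), ('P', 70), ('Q', 80),
   ('R', 90), ('S', 100), ('T', 200), ('U', 300), ('V', 400), ('W', 500), ('X', 600),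
   ('Y', 700), ('Z', 800)]

-- ===== PORT A =====
-- name = name.upper(); unique_name = ''.join(dict.fromkeys(name)); sum(d.get(letter, 0) for letter in unique_name)
def get_kabbalistic_number (name : String) : Int :=
  let kabbalistic_assignment := PySem.Dict.ofList kabPairs
  let up := PySem.Str.upper name
  let unique_name := PySem.List.dedup up.toList
  (unique_name.map (fun letter => kabbalistic_assignment.getD letter 0)).sum

-- ===== PORT B =====
-- up = name.upper(); sum((i%9+1) * 10**(i//9) for i in range(26) if chr(65+i) in up)
-- chr(65+i) is exact here (0 ≤ i < 26 stays in ASCII); 10**(i//9) has a nonnegative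
-- exponent, ported via .toNat; 'chr(..) in up' is a one-character substring test,
-- exact as character membership in up's characters.
def get_kabbalistic_number_alt (name : String) : Int :=
  let up := PySem.Str.upper name
  (PySem.List.pyRange 0 26 1).foldl
    (fun acc i =>
      if up.toList.contains (Char.ofNat (65 + i).toNat) then
        acc + (PySem.Int.mod i 9 + 1) * 10 ^ (PySem.Int.floordiv i 9).toNat
      else acc) 0

-- ===== PRECONDITION & SPEC =====
def Spec_get_kabbalistic_number (name : String) (out : Int) : Prop := out = get_kabbalistic_number_alt name
instance (name : String) (out : Int) : Decidable (Spec_get_kabbalistic_number name out) := by unfold Spec_get_kabbalistic_number; infer_instance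

-- ===== CLAIM (what is proved, stated in full; the proofs are below) =====
def Claim_equal_get_kabbalistic_number : Prop := ∀ (name : String), Dom_get_kabbalistic_number name → Spec_get_kabbalistic_number name (get_kabbalistic_number name)

-- ===== LEMMAS AND PROOFS =====

-- the range scan with the closed formula is the guarded fold over A's literal table
theorem range_fold_eq_table (S : List Char) :
    (PySem.List.pyRange 0 26 1).foldl
      (fun acc i =>
        if S.contains (Char.ofNat (65 + i).toNat) then
          acc + (PySem.Int.mod i 9 + 1) * 10 ^ (PySem.Int.floordiv i 9).toNat
        else acc) 0
    = kabPairs.foldl (fun acc kv => if S.contains kv.1 then acc + kv.2 else acc) 0 := by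
  have h : (PySem.List.pyRange 0 26 1).map
      (fun i => (Char.ofNat (65 + i).toNat,
        (PySem.Int.mod i 9 + 1) * 10 ^ (PySem.Int.floordiv i 9).toNat)) = kabPairs := by
    decide
  rw [← h, List.foldl_map]

-- a guarded foldl over a table is the sum of the guarded values
theorem foldl_guard_sum (S : List Char) (tbl : List (Char × Int)) (acc : Int) :
    tbl.foldl (fun acc kv => if S.contains kv.1 then acc + kv.2 else acc) acc
      = acc + (tbl.map (fun kv => if S.contains kv.1 then kv.2 else 0)).sum := by
  induction tbl generalizing acc with
  | nil => simp
  | cons kv rest ih =>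
    simp only [List.foldl_cons, List.map_cons, List.sum_cons, ih]
    split_ifs <;> ring

-- summing a pointwise 'if c = k' over a nodup list picks up v (in place of g k = 0) at most once
theorem sum_map_if_eq (k : Char) (v : Int) (g : Char → Int) (S : List Char) (h : S.Nodup)
    (hgk : g k = 0) :
    (S.map (fun c => if k == c then v else g c)).sum
      = (if S.contains k then v else 0) + (S.map g).sum := by
  induction S with
  | nil => simp
  | cons c S' ih =>
    rcases List.nodup_cons.mp h with ⟨hc, hS'⟩
    by_cases hk : k = c
    · subst hk
      have hrest : (S'.map (fun c => if k == c then v else g c)).sum = (S'.map g).sum := by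
        congr 1
        apply List.map_congr_left
        intro c' hc'
        have : (k == c') = false := by
          simp only [beq_eq_false_iff_ne, ne_eq]
          rintro rfl; exact hc hc'
        simp [this]
      simp only [List.map_cons, List.sum_cons, beq_self_eq_true, if_true, List.contains_cons,
        Bool.true_or, hrest, hgk]
      ring
    · have hbeq : (k == c) = false := by simp [hk]
      simp only [List.map_cons, List.sum_cons, hbeq, Bool.false_eq_true, if_false,
        List.contains_cons, Bool.false_or, ih hS']
      ring

-- lookup-sum over a nodup list equals the table-side guarded sum (table keys distinct)
theorem sum_getD_eq_table_sum (S : List Char) (h : S.Nodup) (tbl : List (Char × Int))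
    (hnd : (tbl.map Prod.fst).Nodup) :
    (S.map (fun c => (PySem.Dict.mk tbl).getD c 0)).sum
      = (tbl.map (fun kv => if S.contains kv.1 then kv.2 else 0)).sum := by
  induction tbl with
  | nil =>
    simp [PySem.Dict.getD_eq_get?_getD, PySem.Dict.get?, List.map_const']
  | cons kv rest ih =>
    obtain ⟨k, v⟩ := kv
    rcases List.nodup_cons.mp hnd with ⟨hk, hnd'⟩
    have step : ∀ c, (PySem.Dict.mk ((k, v) :: rest)).getD c 0
        = if k == c then v else (PySem.Dict.mk rest).getD c 0 := by
      intro c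
      simp only [PySem.Dict.getD_eq_get?_getD, PySem.Dict.get?_mk_cons]
      split_ifs <;> rfl
    have hgk : (PySem.Dict.mk rest).getD k 0 = 0 := by
      apply PySem.Dict.getD_of_not_contains
      rw [PySem.Dict.contains_eq_decide_mem_keys]
      simpa [PySem.Dict.keys] using hk
    calc (S.map (fun c => (PySem.Dict.mk ((k, v) :: rest)).getD c 0)).sum
        = (S.map (fun c => if k == c then v else (PySem.Dict.mk rest).getD c 0)).sum := by
          simp only [step]
      _ = (if S.contains k then v else 0)
            + (S.map (fun c => (PySem.Dict.mk rest).getD c 0)).sum :=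
          sum_map_if_eq k v _ S h hgk
      _ = (((k, v) :: rest).map (fun kv => if S.contains kv.1 then kv.2 else 0)).sum := by
          simp [ih hnd']

-- the literal dict built by insertion is the literal association list (all keys distinct)
theorem ofList_kabPairs : PySem.Dict.ofList kabPairs = PySem.Dict.mk kabPairs := by decide

-- ===== VERDICT (by name: the statement is the Claim_ definition above) =====
theorem get_kabbalistic_number_spec : Claim_equal_get_kabbalistic_number := by
  intro name _
  unfold Spec_get_kabbalistic_number get_kabbalistic_number get_kabbalistic_number_alt
  simp only [ofList_kabPairs]
  rw [range_fold_eq_table, foldl_guard_sum,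
    sum_getD_eq_table_sum _ (PySem.List.nodup_dedup _) kabPairs (by decide)]
  simp
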